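-- pv_equiv track=rewrite | github.com/ADimityrA/Game-Bingo | 01_console_connect_four.py | check_diagonals
-- ===== SOURCE A (Python) =====
-- def check_diagonals(matrix, searched_number):
--     for x in range(len(matrix) - 3):
--         for j in range(len(matrix[0]) - 3):
--             # Check main diagonal
--             if all(matrix[x + k][j + k] == searched_number for k in range(4)):
--                 return True
--             # Check secondary diagonal
--             if all(matrix[x + k][j + 3 - k] == searched_number for k in range(4)):
--                 return True
--     return False
-- ===== SOURCE B (Python) =====
-- def check_diagonals(matrix, searched_number):
--     if not matrix:
--         return False
--     rows, cols = len(matrix), len(matrix[0])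
--
--     def diag(r, c, dc):
--         line = []
--         while r < rows and 0 <= c < cols and c < len(matrix[r]):
--             line.append(matrix[r][c])
--             r += 1
--             c += dc
--         return line
--
--     def has_run(line):
--         run = 0
--         for v in line:
--             run = run + 1 if v == searched_number else 0
--             if run >= 4:
--                 return True
--         return False
--
--     diags = [diag(r, 0, 1) for r in range(rows)] \
--         + [diag(0, c, 1) for c in range(1, cols)] \
--         + [diag(0, c, -1) for c in range(cols)] \
--         + [diag(r, cols - 1, -1) for r in range(1, rows)]
--     return any(has_run(d) for d in diags)
-- ===== Notes on version B (the rewrite author's own statement) =====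
-- stated objective: faster
-- what changed: B builds every diagonal line of the grid as an explicit list (walking down-right from the first row/column and down-left from the first row/last column while cells exist) and scans each once with a running streak counter, instead of A's test of a fixed 4-cell window at every anchor cell.
import Mathlib
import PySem

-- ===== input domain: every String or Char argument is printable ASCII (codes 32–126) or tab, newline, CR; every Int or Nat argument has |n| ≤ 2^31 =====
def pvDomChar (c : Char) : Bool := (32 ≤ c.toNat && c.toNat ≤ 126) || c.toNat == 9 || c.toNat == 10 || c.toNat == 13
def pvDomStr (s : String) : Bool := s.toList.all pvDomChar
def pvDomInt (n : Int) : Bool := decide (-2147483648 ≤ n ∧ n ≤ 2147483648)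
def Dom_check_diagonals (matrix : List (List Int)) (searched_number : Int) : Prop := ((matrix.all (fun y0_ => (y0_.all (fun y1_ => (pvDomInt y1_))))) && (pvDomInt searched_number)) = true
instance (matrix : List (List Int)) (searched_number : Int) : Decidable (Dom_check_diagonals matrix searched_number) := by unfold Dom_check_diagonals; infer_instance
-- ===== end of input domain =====

-- B replaces A's 4-cell window test at every anchor by collecting each diagonal line
-- of the grid as a list (walking while cells exist) and scanning it once with a running
-- streak counter (objective: alternative).

-- ===== PORT A =====
-- matrix[i][j]; total stand-in for Python's indexing, exact whenever both indices are in range (guaranteed by Pre_)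
def pvCell (m : List (List Int)) (i j : Int) : Int :=
  PySem.List.pyGetD (PySem.List.pyGetD m i []) j 0

def check_diagonals (matrix : List (List Int)) (searched_number : Int) : Bool :=
  (PySem.List.pyRange 0 ((matrix.length : Int) - 3) 1).any (fun x =>
    (PySem.List.pyRange 0 (((matrix.headD []).length : Int) - 3) 1).any (fun j =>
      (PySem.List.pyRange 0 4 1).all
        (fun k => pvCell matrix (x + k) (j + k) == searched_number)
      || (PySem.List.pyRange 0 4 1).all
        (fun k => pvCell matrix (x + k) (j + 3 - k) == searched_number)))

-- ===== PORT B =====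
-- matrix[i][j] for the natural-number indices B uses; in range wherever B's walk reads it
def pvCellN (m : List (List Int)) (i j : Nat) : Int := (m.getD i []).getD j 0

-- has_run: running streak counter, early True at a streak of 4
def pvHasRun (n : Int) : List Int → Nat → Bool
  | [], _ => false
  | v :: vs, run =>
      let run' := if v == n then run + 1 else 0
      if 4 ≤ run' then true else pvHasRun n vs run'

-- diag(r, c, dc): walk down collecting matrix[r][c] while the cell exists, stepping c by dc
def pvDiag (m : List (List Int)) (cols : Nat) (dc : Int) (r : Nat) (c : Int) : List Int :=
  if h : r < m.length ∧ 0 ≤ c ∧ c < (cols : Int) ∧ c < ((m.getD r []).length : Int) then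
    pvCellN m r c.toNat :: pvDiag m cols dc (r + 1) (c + dc)
  else []
termination_by m.length - r
decreasing_by omega

def check_diagonals_alt (matrix : List (List Int)) (searched_number : Int) : Bool :=
  if matrix.isEmpty then false
  else
    let rows := matrix.length
    let cols := (matrix.headD []).length
    let diags : List (List Int) :=
      ((List.range rows).map (fun r => pvDiag matrix cols 1 r 0))
      ++ ((List.range' 1 (cols - 1)).map (fun (c : Nat) => pvDiag matrix cols 1 0 (c : Int)))
      ++ ((List.range cols).map (fun (c : Nat) => pvDiag matrix cols (-1) 0 (c : Int)))
      ++ ((List.range' 1 (rows - 1)).map (fun r => pvDiag matrix cols (-1) r ((cols : Int) - 1)))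
    diags.any (fun d => pvHasRun searched_number d 0)

-- ===== PRECONDITION & SPEC =====
-- Pre_ excludes ragged matrices that are at least 4 rows by 4 first-row columns: there
-- Python A indexes past a short row and raises IndexError unless an earlier window already
-- returned True (those early-True ragged inputs are excluded too, a slight narrowing of
-- A's exact return set).
def Pre_check_diagonals (matrix : List (List Int)) (searched_number : Int) : Prop :=
  (∀ row ∈ matrix, (matrix.headD []).length ≤ row.length) ∨
    matrix.length < 4 ∨ (matrix.headD []).length < 4

instance (matrix : List (List Int)) (searched_number : Int) : Decidable (Pre_check_diagonals matrix searched_number) := by unfold Pre_check_diagonals; infer_instance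

def pvWitness_check_diagonals : List (List Int) × Int :=
  ([[1, 0, 0, 0], [0, 1, 0, 0], [0, 0, 1, 0], [0, 0, 0, 1]], 1)

def Spec_check_diagonals (matrix : List (List Int)) (searched_number : Int) (out : Bool) : Prop := out = check_diagonals_alt matrix searched_number
instance (matrix : List (List Int)) (searched_number : Int) (out : Bool) : Decidable (Spec_check_diagonals matrix searched_number out) := by unfold Spec_check_diagonals; infer_instance

-- ===== CLAIM (what is proved, stated in full; the proofs are below) =====
def Claim_equal_check_diagonals : Prop := ∀ (matrix : List (List Int)) (searched_number : Int), Dom_check_diagonals matrix searched_number → Pre_check_diagonals matrix searched_number → Spec_check_diagonals matrix searched_number (check_diagonals matrix searched_number)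

-- ===== LEMMAS AND PROOFS =====

-- four-in-a-row window inside a single list
def pvWinL (n : Int) (l : List Int) : Prop :=
  ∃ i, i + 4 ≤ l.length ∧ ∀ k < 4, l.getD (i + k) 0 = n

-- four-in-a-row on some diagonal of the grid, phrased through the anchor cell
def pvWin (m : List (List Int)) (n : Int) : Prop :=
  ∃ x j : Nat, x + 3 < m.length ∧ j + 3 < (m.headD []).length ∧
    ((∀ k < 4, pvCellN m (x + k) (j + k) = n) ∨ (∀ k < 4, pvCellN m (x + k) (j + 3 - k) = n))

lemma pvForall4 (p : Nat → Prop) : (∀ k < 4, p k) ↔ p 0 ∧ p 1 ∧ p 2 ∧ p 3 := by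
  constructor
  · intro h; exact ⟨h 0 (by omega), h 1 (by omega), h 2 (by omega), h 3 (by omega)⟩
  · rintro ⟨h0, h1, h2, h3⟩ k hk
    interval_cases k <;> assumption

lemma pvHasRun_iff (n : Int) : ∀ (l : List Int) (r : Nat), r < 4 →
    (pvHasRun n l r = true ↔ pvWinL n (List.replicate r n ++ l)) := by
  intro l
  induction l with
  | nil =>
    intro r hr
    simp only [pvHasRun]
    constructor
    · intro h; cases h
    · rintro ⟨i, hi, -⟩; simp at hi; omega
  | cons v vs ih =>
    intro r hr
    by_cases hv : v = n
    · by_cases hr3 : r = 3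
      · subst hr3
        have he : pvHasRun n (v :: vs) 3 = true := by
          simp only [pvHasRun, hv, beq_self_eq_true, if_true]
          norm_num
        rw [he]
        constructor
        · intro _
          refine ⟨0, by simp, ?_⟩
          intro k hk
          rw [show v :: vs = n :: vs from by rw [hv],
              show List.replicate 3 n ++ n :: vs = n :: n :: n :: n :: vs from rfl]
          interval_cases k <;> rfl
        · intro _; rfl
      · have he : pvHasRun n (v :: vs) r = pvHasRun n vs (r + 1) := by
          simp only [pvHasRun, hv, beq_self_eq_true, if_true]
          rw [if_neg (by omega)]
        rw [he, ih (r + 1) (by omega)]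
        have hl : List.replicate (r + 1) n ++ vs = List.replicate r n ++ v :: vs := by
          rw [List.replicate_succ', List.append_assoc, hv]; rfl
        rw [hl]
    · have he : pvHasRun n (v :: vs) r = pvHasRun n vs 0 := by
        simp only [pvHasRun, beq_iff_eq, if_neg hv]
        rw [if_neg (by omega)]
      rw [he, ih 0 (by omega)]
      simp only [List.replicate_zero, List.nil_append]
      constructor
      · rintro ⟨i, hlen, hall⟩
        refine ⟨r + 1 + i, (by simp only [List.length_append, List.length_replicate, List.length_cons]; omega), ?_⟩
        intro k hk
        rw [List.getD_append_right _ _ _ _ (by simp only [List.length_replicate]; omega)]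
        rw [show r + 1 + i + k - (List.replicate r n).length = i + k + 1 from by
          simp only [List.length_replicate]; omega]
        rw [List.getD_cons_succ]
        exact hall k hk
      · rintro ⟨i, hlen, hall⟩
        simp only [List.length_append, List.length_replicate, List.length_cons] at hlen
        have hir : r + 1 ≤ i := by
          by_contra hcon
          have hrv : (List.replicate r n ++ v :: vs).getD r 0 = v := by
            rw [List.getD_append_right _ _ _ _ (by simp)]
            simp
          have h2 := hall (r - i) (by omega)
          rw [show i + (r - i) = r from by omega] at h2
          exact hv (hrv ▸ h2)
        refine ⟨i - (r + 1), by omega, ?_⟩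
        intro k hk
        have h2 := hall k hk
        rw [List.getD_append_right _ _ _ _ (by simp only [List.length_replicate]; omega)] at h2
        rw [show i + k - (List.replicate r n).length = (i - (r + 1) + k) + 1 from by
          simp only [List.length_replicate]; omega] at h2
        rwa [List.getD_cons_succ] at h2

lemma pvHasRun_zero (n : Int) (l : List Int) : pvHasRun n l 0 = true ↔ pvWinL n l := by
  simpa using pvHasRun_iff n l 0 (by omega)

lemma pvWinL_map_range (n : Int) (f : Nat → Int) (L : Nat) :
    pvWinL n ((List.range L).map f) ↔ ∃ i, i + 4 ≤ L ∧ ∀ k < 4, f (i + k) = n := by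
  constructor
  · rintro ⟨i, hlen, hall⟩
    simp only [List.length_map, List.length_range] at hlen
    refine ⟨i, hlen, fun k hk => ?_⟩
    have := hall k hk
    rwa [PySem.List.getD_map_range f L (i + k) 0 (by omega)] at this
  · rintro ⟨i, hlen, hall⟩
    refine ⟨i, by simp only [List.length_map, List.length_range]; omega, fun k hk => ?_⟩
    rw [PySem.List.getD_map_range f L (i + k) 0 (by omega)]
    exact hall k hk

lemma pvCell_natCast (m : List (List Int)) (a b : Nat) :
    pvCell m (a : Int) (b : Int) = pvCellN m a b := by
  simp [pvCell, pvCellN, PySem.List.pyGetD_natCast]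

lemma pvCell_eqN (m : List (List Int)) (i j : Int) (a b : Nat)
    (hi : i = (a : Int)) (hj : j = (b : Int)) : pvCell m i j = pvCellN m a b := by
  subst hi; subst hj; exact pvCell_natCast m a b

lemma pvA_iff (m : List (List Int)) (n : Int) : check_diagonals m n = true ↔ pvWin m n := by
  unfold check_diagonals
  rw [show PySem.List.pyRange 0 4 1 = [0, 1, 2, 3] from by decide]
  simp only [List.any_eq_true, PySem.List.mem_pyRange_one, List.all_cons, List.all_nil,
    Bool.or_eq_true, Bool.and_eq_true, beq_iff_eq, and_true]
  constructor
  · rintro ⟨x, ⟨hx0, hxlt⟩, j, ⟨hj0, hjlt⟩, hc⟩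
    lift x to ℕ using hx0 with a
    lift j to ℕ using hj0 with b
    refine ⟨a, b, by omega, by omega, ?_⟩
    rcases hc with ⟨h0, h1, h2, h3⟩ | ⟨h0, h1, h2, h3⟩
    · left
      rw [pvForall4]
      rw [pvCell_eqN m _ _ (a + 0) (b + 0) (by omega) (by omega)] at h0
      rw [pvCell_eqN m _ _ (a + 1) (b + 1) (by omega) (by omega)] at h1
      rw [pvCell_eqN m _ _ (a + 2) (b + 2) (by omega) (by omega)] at h2
      rw [pvCell_eqN m _ _ (a + 3) (b + 3) (by omega) (by omega)] at h3
      exact ⟨h0, h1, h2, h3⟩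
    · right
      rw [pvForall4]
      rw [pvCell_eqN m _ _ (a + 0) (b + 3 - 0) (by omega) (by omega)] at h0
      rw [pvCell_eqN m _ _ (a + 1) (b + 3 - 1) (by omega) (by omega)] at h1
      rw [pvCell_eqN m _ _ (a + 2) (b + 3 - 2) (by omega) (by omega)] at h2
      rw [pvCell_eqN m _ _ (a + 3) (b + 3 - 3) (by omega) (by omega)] at h3
      exact ⟨h0, h1, h2, h3⟩
  · rintro ⟨a, b, hx, hj, hc⟩
    refine ⟨(a : Int), ⟨by omega, by omega⟩, (b : Int), ⟨by omega, by omega⟩, ?_⟩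
    rw [pvForall4, pvForall4] at hc
    rcases hc with ⟨h0, h1, h2, h3⟩ | ⟨h0, h1, h2, h3⟩
    · left
      refine ⟨?_, ?_, ?_, ?_⟩
      · rw [pvCell_eqN m _ _ (a + 0) (b + 0) (by omega) (by omega)]; exact h0
      · rw [pvCell_eqN m _ _ (a + 1) (b + 1) (by omega) (by omega)]; exact h1
      · rw [pvCell_eqN m _ _ (a + 2) (b + 2) (by omega) (by omega)]; exact h2
      · rw [pvCell_eqN m _ _ (a + 3) (b + 3) (by omega) (by omega)]; exact h3
    · right
      refine ⟨?_, ?_, ?_, ?_⟩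
      · rw [pvCell_eqN m _ _ (a + 0) (b + 3 - 0) (by omega) (by omega)]; exact h0
      · rw [pvCell_eqN m _ _ (a + 1) (b + 3 - 1) (by omega) (by omega)]; exact h1
      · rw [pvCell_eqN m _ _ (a + 2) (b + 3 - 2) (by omega) (by omega)]; exact h2
      · rw [pvCell_eqN m _ _ (a + 3) (b + 3 - 3) (by omega) (by omega)]; exact h3

lemma pvDiag_pos_fuel (m : List (List Int)) (cols : Nat)
    (hrect : ∀ row ∈ m, cols ≤ row.length) :
    ∀ (fuel r : Nat) (c : Nat), m.length - r ≤ fuel →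
      pvDiag m cols 1 r (c : Int) =
        (List.range (min (m.length - r) (cols - c))).map (fun t => pvCellN m (r + t) (c + t)) := by
  intro fuel
  induction fuel with
  | zero =>
    intro r c h
    rw [pvDiag, dif_neg (by rintro ⟨h1, -⟩; omega)]
    rw [show min (m.length - r) (cols - c) = 0 from by omega]
    rfl
  | succ fn ih =>
    intro r c h
    rw [pvDiag]
    by_cases hr : r < m.length
    · have hrow : cols ≤ (m.getD r []).length := by
        rw [List.getD_eq_getElem _ _ hr]
        exact hrect _ (List.getElem_mem hr)
      by_cases hc : c < cols
      · rw [dif_pos ⟨hr, by omega, by omega, by omega⟩]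
        rw [show (c : Int) + 1 = ((c + 1 : Nat) : Int) from by omega]
        rw [ih (r + 1) (c + 1) (by omega)]
        rw [show min (m.length - r) (cols - c) = min (m.length - (r + 1)) (cols - (c + 1)) + 1
            from by omega]
        rw [List.range_succ_eq_map, List.map_cons, List.map_map]
        congr 1 <;>
          first
          | rfl
          | exact List.map_congr_left fun a _ => by
              rw [show r + 1 + a = r + (a + 1) from by omega,
                show c + 1 + a = c + (a + 1) from by omega]
              rfl
          | (intro a _ _
             rw [show r + 1 + a = r + (a + 1) from by omega,
               show c + 1 + a = c + (a + 1) from by omega])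
      · rw [dif_neg (by rintro ⟨-, -, h3, -⟩; omega)]
        rw [show min (m.length - r) (cols - c) = 0 from by omega]
        rfl
    · rw [dif_neg (by rintro ⟨h1, -⟩; omega)]
      rw [show min (m.length - r) (cols - c) = 0 from by omega]
      rfl

lemma pvDiag_neg_fuel (m : List (List Int)) (cols : Nat)
    (hrect : ∀ row ∈ m, cols ≤ row.length) :
    ∀ (fuel r : Nat) (c : Nat), m.length - r ≤ fuel → c < cols →
      pvDiag m cols (-1) r (c : Int) =
        (List.range (min (m.length - r) (c + 1))).map (fun t => pvCellN m (r + t) (c - t)) := by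
  intro fuel
  induction fuel with
  | zero =>
    intro r c h hc
    rw [pvDiag, dif_neg (by rintro ⟨h1, -⟩; omega)]
    rw [show min (m.length - r) (c + 1) = 0 from by omega]
    rfl
  | succ fn ih =>
    intro r c h hc
    rw [pvDiag]
    by_cases hr : r < m.length
    · have hrow : cols ≤ (m.getD r []).length := by
        rw [List.getD_eq_getElem _ _ hr]
        exact hrect _ (List.getElem_mem hr)
      rw [dif_pos ⟨hr, by omega, by omega, by omega⟩]
      by_cases hc0 : c = 0
      · subst hc0
        rw [show ((0 : Nat) : Int) + -1 = -1 from by omega]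
        rw [pvDiag, dif_neg (by rintro ⟨-, h2, -⟩; omega)]
        rw [show min (m.length - r) (0 + 1) = 1 from by omega]
        simp [pvCellN]
      · rw [show (c : Int) + -1 = ((c - 1 : Nat) : Int) from by omega]
        rw [ih (r + 1) (c - 1) (by omega) (by omega)]
        rw [show min (m.length - r) (c + 1) = min (m.length - (r + 1)) (c - 1 + 1) + 1
            from by omega]
        rw [List.range_succ_eq_map, List.map_cons, List.map_map]
        congr 1 <;>
          first
          | rfl
          | exact List.map_congr_left fun a _ => by
              rw [show r + 1 + a = r + (a + 1) from by omega,
                show c - 1 - a = c - (a + 1) from by omega]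
              rfl
          | (intro a _ _
             rw [show r + 1 + a = r + (a + 1) from by omega,
               show c - 1 - a = c - (a + 1) from by omega])
    · rw [dif_neg (by rintro ⟨h1, -⟩; omega)]
      rw [show min (m.length - r) (c + 1) = 0 from by omega]
      rfl

lemma pvFam1 (m : List (List Int)) (cols : Nat) (hrect : ∀ row ∈ m, cols ≤ row.length) (r : Nat) :
    pvDiag m cols 1 r 0 =
      (List.range (min (m.length - r) cols)).map (fun t => pvCellN m (r + t) t) := by
  simpa using pvDiag_pos_fuel m cols hrect (m.length - r) r 0 (by omega)

lemma pvFam2 (m : List (List Int)) (cols : Nat) (hrect : ∀ row ∈ m, cols ≤ row.length) (c : Nat) :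
    pvDiag m cols 1 0 (c : Int) =
      (List.range (min m.length (cols - c))).map (fun t => pvCellN m t (c + t)) := by
  simpa using pvDiag_pos_fuel m cols hrect m.length 0 c (by omega)

lemma pvFam3 (m : List (List Int)) (cols : Nat) (hrect : ∀ row ∈ m, cols ≤ row.length) (c : Nat)
    (hc : c < cols) :
    pvDiag m cols (-1) 0 (c : Int) =
      (List.range (min m.length (c + 1))).map (fun t => pvCellN m t (c - t)) := by
  simpa using pvDiag_neg_fuel m cols hrect m.length 0 c (by omega) hc

lemma pvFam4 (m : List (List Int)) (cols : Nat) (hrect : ∀ row ∈ m, cols ≤ row.length) (r : Nat)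
    (hC : 0 < cols) :
    pvDiag m cols (-1) r ((cols : Int) - 1) =
      (List.range (min (m.length - r) cols)).map (fun t => pvCellN m (r + t) (cols - 1 - t)) := by
  have h := pvDiag_neg_fuel m cols hrect (m.length - r) r (cols - 1) (by omega) (by omega)
  rw [show ((cols - 1 : Nat) : Int) = (cols : Int) - 1 from by omega] at h
  rw [show cols - 1 + 1 = cols from by omega] at h
  exact h

lemma pvDiag_len_le_fuel (m : List (List Int)) (cols : Nat) (dc : Int) :
    ∀ (fuel r : Nat) (c : Int), m.length - r ≤ fuel → (pvDiag m cols dc r c).length ≤ fuel := by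
  intro fuel
  induction fuel with
  | zero =>
    intro r c h
    rw [pvDiag, dif_neg (by rintro ⟨h1, -⟩; omega)]
    simp
  | succ fn ih =>
    intro r c h
    rw [pvDiag]
    by_cases hco : r < m.length ∧ 0 ≤ c ∧ c < (cols : Int) ∧ c < ((m.getD r []).length : Int)
    · rw [dif_pos hco]
      obtain ⟨h1, -⟩ := hco
      have := ih (r + 1) (c + dc) (by omega)
      simp only [List.length_cons]
      omega
    · rw [dif_neg hco]
      simp

lemma pvDiag_len_le_posc (m : List (List Int)) (cols : Nat) :
    ∀ (fuel r : Nat) (c : Int), m.length - r ≤ fuel →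
      (pvDiag m cols 1 r c).length ≤ ((cols : Int) - c).toNat := by
  intro fuel
  induction fuel with
  | zero =>
    intro r c h
    rw [pvDiag, dif_neg (by rintro ⟨h1, -⟩; omega)]
    simp
  | succ fn ih =>
    intro r c h
    rw [pvDiag]
    by_cases hco : r < m.length ∧ 0 ≤ c ∧ c < (cols : Int) ∧ c < ((m.getD r []).length : Int)
    · rw [dif_pos hco]
      obtain ⟨h1, h2, h3, -⟩ := hco
      have := ih (r + 1) (c + 1) (by omega)
      simp only [List.length_cons]
      omega
    · rw [dif_neg hco]
      simp

lemma pvDiag_len_le_negc (m : List (List Int)) (cols : Nat) :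
    ∀ (fuel r : Nat) (c : Int), m.length - r ≤ fuel →
      (pvDiag m cols (-1) r c).length ≤ (c + 1).toNat := by
  intro fuel
  induction fuel with
  | zero =>
    intro r c h
    rw [pvDiag, dif_neg (by rintro ⟨h1, -⟩; omega)]
    simp
  | succ fn ih =>
    intro r c h
    rw [pvDiag]
    by_cases hco : r < m.length ∧ 0 ≤ c ∧ c < (cols : Int) ∧ c < ((m.getD r []).length : Int)
    · rw [dif_pos hco]
      obtain ⟨h1, h2, -⟩ := hco
      have := ih (r + 1) (c + -1) (by omega)
      simp only [List.length_cons]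
      omega
    · rw [dif_neg hco]
      simp

lemma pvHasRun_short (n : Int) (l : List Int) (h : l.length < 4) : pvHasRun n l 0 = false := by
  cases hr : pvHasRun n l 0
  · rfl
  · obtain ⟨i, hle, -⟩ := (pvHasRun_zero n l).mp hr
    omega

lemma pvB_small (m : List (List Int)) (n : Int)
    (hsmall : m.length < 4 ∨ (m.headD []).length < 4) :
    check_diagonals_alt m n = false := by
  by_cases hm : m.isEmpty
  · rw [check_diagonals_alt, if_pos hm]
  · rw [check_diagonals_alt, if_neg hm]
    simp only [List.any_append, List.any_map, Bool.or_eq_false_iff, List.any_eq_false,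
      Function.comp, List.mem_range, List.mem_range'_1, Bool.not_eq_true]
    refine ⟨⟨⟨fun r hr => ?_, fun c hc => ?_⟩, fun c hc => ?_⟩, fun r hr => ?_⟩
    · apply pvHasRun_short
      have h1 := pvDiag_len_le_fuel m (m.headD []).length 1 (m.length - r) r 0 (by omega)
      have h2 := pvDiag_len_le_posc m (m.headD []).length (m.length - r) r 0 (by omega)
      omega
    · apply pvHasRun_short
      have h1 := pvDiag_len_le_fuel m (m.headD []).length 1 m.length 0 (c : Int) (by omega)
      have h2 := pvDiag_len_le_posc m (m.headD []).length m.length 0 (c : Int) (by omega)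
      omega
    · apply pvHasRun_short
      have h1 := pvDiag_len_le_fuel m (m.headD []).length (-1) m.length 0 (c : Int) (by omega)
      have h2 := pvDiag_len_le_negc m (m.headD []).length m.length 0 (c : Int) (by omega)
      omega
    · apply pvHasRun_short
      have h1 := pvDiag_len_le_fuel m (m.headD []).length (-1) (m.length - r) r
        (((m.headD []).length : Int) - 1) (by omega)
      have h2 := pvDiag_len_le_negc m (m.headD []).length (m.length - r) r
        (((m.headD []).length : Int) - 1) (by omega)
      omega

lemma pvB_iff (m : List (List Int)) (n : Int)
    (hrect : ∀ row ∈ m, (m.headD []).length ≤ row.length) :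
    check_diagonals_alt m n = true ↔ pvWin m n := by
  by_cases hm : m.isEmpty
  · rw [check_diagonals_alt, if_pos hm]
    have hm0 : m.length = 0 := by simpa [List.isEmpty_iff_length_eq_zero] using hm
    constructor
    · intro h; cases h
    · rintro ⟨x, j, hx, -⟩; omega
  · rw [check_diagonals_alt, if_neg hm]
    simp only [List.any_append, List.any_map, Bool.or_eq_true, List.any_eq_true,
      Function.comp, List.mem_range, List.mem_range'_1]
    constructor
    · rintro (((⟨r, hr, hRun⟩ | ⟨c, ⟨hc1, hc2⟩, hRun⟩) | ⟨c, hc, hRun⟩) | ⟨r, ⟨hr1, hr2⟩, hRun⟩)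
      · rw [pvFam1 m _ hrect r, pvHasRun_zero, pvWinL_map_range] at hRun
        obtain ⟨i, hle, hall⟩ := hRun
        refine ⟨r + i, i, by omega, by omega, Or.inl fun k hk => ?_⟩
        rw [show r + i + k = r + (i + k) from by omega]
        exact hall k hk
      · rw [pvFam2 m _ hrect c, pvHasRun_zero, pvWinL_map_range] at hRun
        obtain ⟨i, hle, hall⟩ := hRun
        refine ⟨i, c + i, by omega, by omega, Or.inl fun k hk => ?_⟩
        rw [show c + i + k = c + (i + k) from by omega]
        exact hall k hk
      · rw [pvFam3 m _ hrect c hc, pvHasRun_zero, pvWinL_map_range] at hRun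
        obtain ⟨i, hle, hall⟩ := hRun
        refine ⟨i, c - i - 3, by omega, by omega, Or.inr fun k hk => ?_⟩
        rw [show c - i - 3 + 3 - k = c - (i + k) from by omega]
        exact hall k hk
      · by_cases hC : 0 < (m.headD []).length
        · rw [pvFam4 m _ hrect r hC, pvHasRun_zero, pvWinL_map_range] at hRun
          obtain ⟨i, hle, hall⟩ := hRun
          refine ⟨r + i, (m.headD []).length - 4 - i, by omega, by omega, Or.inr fun k hk => ?_⟩
          rw [show r + i + k = r + (i + k) from by omega,
            show (m.headD []).length - 4 - i + 3 - k = (m.headD []).length - 1 - (i + k)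
              from by omega]
          exact hall k hk
        · exfalso
          have h2 := pvDiag_len_le_negc m (m.headD []).length (m.length - r) r
            (((m.headD []).length : Int) - 1) (by omega)
          have h3 := pvHasRun_short n (pvDiag m (m.headD []).length (-1) r
            (((m.headD []).length : Int) - 1)) (by omega)
          rw [hRun] at h3
          cases h3
    · rintro ⟨x, j, hx, hj, hc | hc⟩
      · by_cases hxj : j ≤ x
        · refine Or.inl (Or.inl (Or.inl ⟨x - j, by omega, ?_⟩))
          rw [pvFam1 m _ hrect (x - j), pvHasRun_zero, pvWinL_map_range]
          refine ⟨j, by omega, fun k hk => ?_⟩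
          rw [show x - j + (j + k) = x + k from by omega]
          exact hc k hk
        · refine Or.inl (Or.inl (Or.inr ⟨j - x, ⟨by omega, by omega⟩, ?_⟩))
          rw [pvFam2 m _ hrect (j - x), pvHasRun_zero, pvWinL_map_range]
          refine ⟨x, by omega, fun k hk => ?_⟩
          rw [show j - x + (x + k) = j + k from by omega]
          exact hc k hk
      · by_cases hs : x + j + 3 < (m.headD []).length
        · refine Or.inl (Or.inr ⟨x + j + 3, hs, ?_⟩)
          rw [pvFam3 m _ hrect (x + j + 3) hs, pvHasRun_zero, pvWinL_map_range]
          refine ⟨x, by omega, fun k hk => ?_⟩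
          rw [show x + j + 3 - (x + k) = j + 3 - k from by omega]
          exact hc k hk
        · refine Or.inr ⟨x + j + 4 - (m.headD []).length, ⟨by omega, by omega⟩, ?_⟩
          rw [pvFam4 m _ hrect _ (by omega), pvHasRun_zero, pvWinL_map_range]
          refine ⟨(m.headD []).length - 4 - j, by omega, fun k hk => ?_⟩
          rw [show x + j + 4 - (m.headD []).length + ((m.headD []).length - 4 - j + k) = x + k
              from by omega,
            show (m.headD []).length - 1 - ((m.headD []).length - 4 - j + k) = j + 3 - k
              from by omega]
          exact hc k hk

lemma pvA_small (m : List (List Int)) (n : Int)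
    (hsmall : m.length < 4 ∨ (m.headD []).length < 4) :
    check_diagonals m n = false := by
  cases hA : check_diagonals m n
  · rfl
  · obtain ⟨x, j, hx, hj, -⟩ := (pvA_iff m n).mp hA
    omega

-- ===== VERDICT (by name: the statement is the Claim_ definition above) =====
theorem check_diagonals_spec : Claim_equal_check_diagonals := by
  intro m n _ hpre
  unfold Spec_check_diagonals
  rcases hpre with hrect | hsmall | hsmall
  · have h := (pvA_iff m n).trans (pvB_iff m n hrect).symm
    cases hA : check_diagonals m n <;> cases hB : check_diagonals_alt m n <;> simp_all
  · rw [pvA_small m n (Or.inl hsmall), pvB_small m n (Or.inl hsmall)]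
  · rw [pvA_small m n (Or.inr hsmall), pvB_small m n (Or.inr hsmall)]
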